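-- pv_equiv track=rewrite | github.com/thorin-schiffer/freeturn | crm/gmail_utils.py | remove_quotation
-- ===== SOURCE A (Python) =====
-- def remove_quotation(text):
--     lines = text.splitlines()
--     outer_quotation_started = False
--     for i, line in enumerate(lines):
--         if line.startswith('>'):
--             if outer_quotation_started:
--                 return '\n'.join(lines[:i])
--             else:
--                 outer_quotation_started = True
--     return text
-- ===== SOURCE B (Python) =====
-- def _split_at_quote(lines):
--     """Consume lines up to the first '>'-line: (segment before it, that line or None, the rest)."""
--     it = iter(lines)
--     segment = []
--     for line in it:
--         if line.startswith('>'):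
--             return segment, line, list(it)
--         segment.append(line)
--     return segment, None, []
--
--
-- def remove_quotation(text):
--     head, q1, rest = _split_at_quote(text.splitlines())
--     if q1 is None:
--         return text
--     mid, q2, _ = _split_at_quote(rest)
--     if q2 is None:
--         return text
--     return '\n'.join(head + [q1] + mid)
-- ===== Notes on version B (the rewrite author's own statement) =====
-- stated objective: alternative
-- what changed: Instead of a stateful flag scan over enumerated lines with an early return that slices by index, B splits the line list into segments around the first and second quote lines with a reusable split-at-first-match helper and reassembles the kept segments by concatenation.
import Mathlib
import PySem

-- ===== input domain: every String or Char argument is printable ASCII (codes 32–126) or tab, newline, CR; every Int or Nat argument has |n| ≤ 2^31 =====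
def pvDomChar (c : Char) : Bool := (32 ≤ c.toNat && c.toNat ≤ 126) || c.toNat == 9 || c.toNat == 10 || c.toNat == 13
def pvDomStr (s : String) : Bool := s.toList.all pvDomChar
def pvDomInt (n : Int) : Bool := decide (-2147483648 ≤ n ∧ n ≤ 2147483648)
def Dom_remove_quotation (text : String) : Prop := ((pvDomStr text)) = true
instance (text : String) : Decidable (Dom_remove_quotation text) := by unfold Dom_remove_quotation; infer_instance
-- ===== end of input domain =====

-- B splits the line list into segments around the first two '>'-lines with a reusable split-at-first-match helper and reassembles them, replacing A's flag scan with an index slice; objective: alternative.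


-- ===== PORT A =====
-- the for-loop over enumerate(lines) with the boolean flag and early return
def rqLoop (lines : List String) (text : String) :
    List (Int × String) → Bool → String
  | [], _ => text
  | (i, line) :: rest, flag =>
    if PySem.Str.startswith line ">" then
      if flag then PySem.Str.join "\n" (PySem.List.slice lines none (some i))
      else rqLoop lines text rest true
    else rqLoop lines text rest flag

def remove_quotation (text : String) : String :=
  let lines := PySem.Str.splitlines text
  rqLoop lines text (PySem.List.enumerate lines 0) false

-- ===== PORT B =====
-- _split_at_quote: consume lines up to the first '>'-line, returning
-- (segment before it, that line or None, the remaining lines)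
def splitAtQuote : List String → List String × Option String × List String
  | [] => ([], none, [])
  | l :: rest =>
    if PySem.Str.startswith l ">" then ([], some l, rest)
    else
      let r := splitAtQuote rest
      (l :: r.1, r.2.1, r.2.2)

def remove_quotation_alt (text : String) : String :=
  let r := splitAtQuote (PySem.Str.splitlines text)
  match r.2.1 with
  | none => text
  | some q =>
    let r2 := splitAtQuote r.2.2
    match r2.2.1 with
    | none => text
    | some _ => PySem.Str.join "\n" (r.1 ++ [q] ++ r2.1)

-- ===== PRECONDITION & SPEC =====
def Spec_remove_quotation (text : String) (out : String) : Prop := out = remove_quotation_alt text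
instance (text : String) (out : String) : Decidable (Spec_remove_quotation text out) := by unfold Spec_remove_quotation; infer_instance

-- ===== CLAIM =====
def Claim_equal_remove_quotation : Prop := ∀ (text : String), Dom_remove_quotation text → Spec_remove_quotation text (remove_quotation text)

-- ===== LEMMAS AND PROOFS =====

-- the split decomposes the list: on a hit, the list is prefix ++ hit :: rest
theorem splitAtQuote_eq_append (l : List String) :
    ∀ q, (splitAtQuote l).2.1 = some q →
      l = (splitAtQuote l).1 ++ q :: (splitAtQuote l).2.2 := by
  induction l with
  | nil => intro q h; simp [splitAtQuote] at h
  | cons x xs ih =>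
    intro q h
    by_cases hx : PySem.Str.startswith x ">" = true
    · simp only [splitAtQuote, if_pos hx] at h ⊢
      simp only [Option.some.injEq] at h
      subst h; rfl
    · simp only [splitAtQuote, if_neg hx] at h ⊢
      rw [List.cons_append]
      exact congrArg (x :: ·) (ih q h)

-- A's loop, characterised by the split: with the flag set it cuts at the first quote of l
-- (at absolute index n + prefix length), with the flag clear at the second.
theorem rqLoop_eq (lines : List String) (text : String) :
    ∀ (l : List String) (n : Int),
      (rqLoop lines text (PySem.List.enumerate l n) true =
        match (splitAtQuote l).2.1 with
        | some _ => PySem.Str.join "\n"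
            (PySem.List.slice lines none (some (n + ((splitAtQuote l).1.length : Int))))
        | none => text) ∧
      (rqLoop lines text (PySem.List.enumerate l n) false =
        match (splitAtQuote l).2.1 with
        | none => text
        | some _ =>
          match (splitAtQuote (splitAtQuote l).2.2).2.1 with
          | none => text
          | some _ => PySem.Str.join "\n"
              (PySem.List.slice lines none
                (some (n + ((splitAtQuote l).1.length : Int) + 1 +
                  ((splitAtQuote (splitAtQuote l).2.2).1.length : Int))))) := by
  intro l
  induction l with
  | nil => intro n; simp [PySem.List.enumerate_nil, rqLoop, splitAtQuote]
  | cons x xs ih =>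
    intro n
    rw [PySem.List.enumerate_cons]
    by_cases hx : PySem.Str.startswith x ">" = true
    · constructor
      · simp only [rqLoop, hx, if_pos, splitAtQuote]
        simp
      · simp only [rqLoop, splitAtQuote, if_pos hx, Bool.false_eq_true, if_false]
        rw [(ih (n+1)).1]
        cases hq : (splitAtQuote xs).2.1 with
        | none => simp
        | some q =>
          simp only [List.length_nil]
          congr 2
          push_cast
          ring_nf
    · constructor
      · simp only [rqLoop, hx, Bool.false_eq_true, if_false]
        rw [(ih (n+1)).1]
        simp only [splitAtQuote, if_neg hx]
        cases hq : (splitAtQuote xs).2.1 with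
        | none => simp
        | some q =>
          simp only [List.length_cons]
          congr 2
          push_cast
          ring_nf
      · simp only [rqLoop, hx, Bool.false_eq_true, if_false]
        rw [(ih (n+1)).2]
        simp only [splitAtQuote, if_neg hx]
        cases hq : (splitAtQuote xs).2.1 with
        | none => simp
        | some q =>
          simp only
          cases (splitAtQuote (splitAtQuote xs).2.2).2.1 with
          | none => simp
          | some q2 =>
            simp only [List.length_cons]
            congr 2
            push_cast
            ring_nf

-- B's body with the lets floated out (definitional)
theorem alt_eq (text : String) :
    remove_quotation_alt text =
      match (splitAtQuote (PySem.Str.splitlines text)).2.1 with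
      | none => text
      | some q =>
        match (splitAtQuote (splitAtQuote (PySem.Str.splitlines text)).2.2).2.1 with
        | none => text
        | some _ => PySem.Str.join "\n"
            ((splitAtQuote (PySem.Str.splitlines text)).1 ++ [q] ++
              (splitAtQuote (splitAtQuote (PySem.Str.splitlines text)).2.2).1) := rfl

-- ===== VERDICT =====
theorem remove_quotation_spec : Claim_equal_remove_quotation := by
  intro text _
  unfold Spec_remove_quotation remove_quotation
  rw [alt_eq]
  show rqLoop (PySem.Str.splitlines text) text
      (PySem.List.enumerate (PySem.Str.splitlines text) 0) false = _
  rw [(rqLoop_eq (PySem.Str.splitlines text) text (PySem.Str.splitlines text) 0).2]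
  generalize PySem.Str.splitlines text = lines
  cases hq : (splitAtQuote lines).2.1 with
  | none => rfl
  | some q =>
    simp only
    cases hq2 : (splitAtQuote (splitAtQuote lines).2.2).2.1 with
    | none => rfl
    | some q2 =>
      simp only
      obtain ⟨⟨p, o1, r⟩, hs1⟩ : ∃ t, splitAtQuote lines = t := ⟨_, rfl⟩
      have h1 := splitAtQuote_eq_append lines q hq
      rw [hs1] at hq h1 hq2 ⊢
      simp only at hq h1 hq2 ⊢
      obtain ⟨⟨p2, o2, r2⟩, hs2⟩ : ∃ t, splitAtQuote r = t := ⟨_, rfl⟩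
      have h2 := splitAtQuote_eq_append r q2 hq2
      rw [hs2] at hq2 h2 ⊢
      simp only at hq2 h2 ⊢
      congr 1
      have hidx : (0 : Int) + (p.length : Int) + 1 + (p2.length : Int) =
          (((p ++ q :: p2).length : Nat) : Int) := by
        push_cast [List.length_append, List.length_cons]
        ring
      rw [hidx, PySem.List.slice_to_natCast, h1, h2]
      rw [show p ++ q :: (p2 ++ q2 :: r2) = (p ++ q :: p2) ++ q2 :: r2 by
        simp [List.cons_append, List.append_assoc]]
      rw [List.take_left]
      simp
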